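-- pv_equiv track=rewrite | github.com/NicolasGoulet/responsible-ai-sensification | app/server/pipeline/pitch_policy.py | _nearest_scale_midi
-- ===== SOURCE A (Python) =====
-- def _nearest_scale_midi(raw_midi: int, allowed_pitch_classes: list[int]) -> int:
--     """Return the nearest MIDI note whose pitch class belongs to the target scale."""
--     best = raw_midi
--     best_distance = None
--     for candidate in range(raw_midi - 12, raw_midi + 13):
--         if candidate % 12 not in allowed_pitch_classes:
--             continue
--         distance = abs(candidate - raw_midi)
--         if best_distance is None or distance < best_distance:
--             best = candidate
--             best_distance = distance
--     return best
-- ===== SOURCE B (Python) =====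
-- def _nearest_scale_midi(raw_midi: int, allowed_pitch_classes: list[int]) -> int:
--     """Expanding-ring search: try distances 0..12 outward, lower note first on ties."""
--     allowed = set(allowed_pitch_classes)
--     for d in range(13):
--         if (raw_midi - d) % 12 in allowed:
--             return raw_midi - d
--         if (raw_midi + d) % 12 in allowed:
--             return raw_midi + d
--     return raw_midi
-- ===== Notes on version B (the rewrite author's own statement) =====
-- stated objective: faster
-- what changed: Replaces the full 25-candidate window scan with a best/best_distance accumulator by an expanding-ring search over distances 0..12 (lower note checked first, early return) against a set of allowed pitch classes built once.
import Mathlib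
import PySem

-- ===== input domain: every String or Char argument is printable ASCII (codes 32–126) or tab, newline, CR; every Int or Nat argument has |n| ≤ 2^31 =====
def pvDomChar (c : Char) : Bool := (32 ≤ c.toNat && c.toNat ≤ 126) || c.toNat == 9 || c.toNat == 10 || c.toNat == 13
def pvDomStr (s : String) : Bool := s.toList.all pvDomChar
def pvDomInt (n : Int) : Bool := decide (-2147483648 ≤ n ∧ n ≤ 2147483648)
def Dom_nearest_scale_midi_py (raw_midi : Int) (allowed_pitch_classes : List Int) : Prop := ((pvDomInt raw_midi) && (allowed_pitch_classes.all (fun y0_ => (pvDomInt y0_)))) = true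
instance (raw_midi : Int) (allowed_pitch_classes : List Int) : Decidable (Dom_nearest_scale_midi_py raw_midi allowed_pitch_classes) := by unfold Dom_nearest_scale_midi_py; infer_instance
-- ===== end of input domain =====

-- B replaces A's 25-candidate window scan with an expanding-ring search over distances 0..12
-- (set membership built once, early return, lower note first on ties); return values agree everywhere.

-- ===== PORT A =====
-- loop body of A's `for candidate in range(...)`: state = (best, best_distance)
def pvStepA (raw_midi : Int) (allowed_pitch_classes : List Int)
    (st : Int × Option Int) (candidate : Int) : Int × Option Int :=
  if PySem.Int.mod candidate 12 ∈ allowed_pitch_classes then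
    let distance := |candidate - raw_midi|
    match st.2 with
    | none => (candidate, some distance)
    | some bd => if distance < bd then (candidate, some distance) else st
  else st

def nearest_scale_midi_py (raw_midi : Int) (allowed_pitch_classes : List Int) : Int :=
  ((PySem.List.pyRange (raw_midi - 12) (raw_midi + 13)).foldl
    (pvStepA raw_midi allowed_pitch_classes) (raw_midi, none)).1

-- ===== PORT B =====
-- B's `for d in range(13)` loop with early return
def pvLoopB (raw_midi : Int) (allowed : PySem.Set Int) : List Int → Int
  | [] => raw_midi
  | d :: ds =>
    if PySem.Set.contains allowed (PySem.Int.mod (raw_midi - d) 12) then raw_midi - d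
    else if PySem.Set.contains allowed (PySem.Int.mod (raw_midi + d) 12) then raw_midi + d
    else pvLoopB raw_midi allowed ds

def nearest_scale_midi_py_alt (raw_midi : Int) (allowed_pitch_classes : List Int) : Int :=
  pvLoopB raw_midi (PySem.Set.ofList allowed_pitch_classes) (PySem.List.pyRange 0 13)

-- ===== PRECONDITION & SPEC =====
def Spec_nearest_scale_midi_py (raw_midi : Int) (allowed_pitch_classes : List Int) (out : Int) : Prop := out = nearest_scale_midi_py_alt raw_midi allowed_pitch_classes
instance (raw_midi : Int) (allowed_pitch_classes : List Int) (out : Int) : Decidable (Spec_nearest_scale_midi_py raw_midi allowed_pitch_classes out) := by unfold Spec_nearest_scale_midi_py; infer_instance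

-- ===== CLAIM (what is proved, stated in full; the proofs are below) =====
def Claim_equal_nearest_scale_midi_py : Prop := ∀ (raw_midi : Int) (allowed_pitch_classes : List Int), Dom_nearest_scale_midi_py raw_midi allowed_pitch_classes → Spec_nearest_scale_midi_py raw_midi allowed_pitch_classes (nearest_scale_midi_py raw_midi allowed_pitch_classes)

-- ===== LEMMAS AND PROOFS =====

-- "the pitch class of candidate c is allowed"
def pvCond (allowed : List Int) (c : Int) : Bool := decide (PySem.Int.mod c 12 ∈ allowed)

-- the value both programs must return: either no candidate in the window is allowed and res = raw,
-- or res is the allowed window candidate minimising (|c - raw|, c) lexicographically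
def pvIsBest (raw : Int) (allowed : List Int) (res : Int) : Prop :=
  (res = raw ∧ ∀ c : Int, raw - 12 ≤ c → c < raw + 13 → pvCond allowed c = false)
  ∨ (raw - 12 ≤ res ∧ res < raw + 13 ∧ pvCond allowed res = true ∧
     ∀ c : Int, raw - 12 ≤ c → c < raw + 13 → pvCond allowed c = true →
       |res - raw| < |c - raw| ∨ (|res - raw| = |c - raw| ∧ res ≤ c))

lemma pvIsBest_unique (raw : Int) (allowed : List Int) (r1 r2 : Int)
    (h1 : pvIsBest raw allowed r1) (h2 : pvIsBest raw allowed r2) : r1 = r2 := by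
  rcases h1 with ⟨e1, all1⟩ | ⟨lo1, hi1, c1, min1⟩ <;>
    rcases h2 with ⟨e2, all2⟩ | ⟨lo2, hi2, c2, min2⟩
  · omega
  · have := all1 r2 lo2 hi2; simp [this] at c2
  · have := all2 r1 lo1 hi1; simp [this] at c1
  · have ha := min1 r2 lo2 hi2 c2
    have hb := min2 r1 lo1 hi1 c1
    rw [Int.abs_eq_natAbs, Int.abs_eq_natAbs] at ha hb
    omega

-- invariant of A's fold over a prefix L of the candidate window
def pvInv (raw : Int) (allowed : List Int) (L : List Int) (st : Int × Option Int) : Prop :=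
  (st = (raw, none) ∧ ∀ c ∈ L, pvCond allowed c = false)
  ∨ (st.1 ∈ L ∧ pvCond allowed st.1 = true ∧ st.2 = some |st.1 - raw| ∧
     ∀ c ∈ L, pvCond allowed c = true →
       |st.1 - raw| < |c - raw| ∨ (|st.1 - raw| = |c - raw| ∧ st.1 ≤ c))

lemma pvInv_step (raw : Int) (allowed : List Int) (L : List Int) (st : Int × Option Int) (a : Int)
    (hst : pvInv raw allowed L st) (hlt : ∀ x ∈ L, x < a) :
    pvInv raw allowed (L ++ [a]) (pvStepA raw allowed st a) := by
  unfold pvStepA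
  by_cases hc : PySem.Int.mod a 12 ∈ allowed
  · simp only [hc, if_true]
    rcases hst with ⟨hst, hall⟩ | ⟨hmem, hcond, hsnd, hmin⟩
    · rw [hst]
      right
      refine ⟨by simp, by simpa [pvCond] using hc, rfl, ?_⟩
      dsimp only
      intro c hcmem hccond
      rcases List.mem_append.mp hcmem with h | h
      · exact absurd hccond (by simp [hall c h])
      · simp at h; subst h; right; exact ⟨rfl, le_refl _⟩
    · rw [hsnd]
      by_cases hd : |a - raw| < |st.1 - raw|
      · simp only [hd, if_true]
        right
        refine ⟨by simp, by simpa [pvCond] using hc, rfl, ?_⟩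
        dsimp only
        intro c hcmem hccond
        rcases List.mem_append.mp hcmem with h | h
        · rcases hmin c h hccond with h' | ⟨h', _⟩
          · left; omega
          · left; omega
        · simp at h; subst h; right; exact ⟨rfl, le_refl _⟩
      · simp only [hd, if_false]
        right
        refine ⟨List.mem_append.mpr (Or.inl hmem), hcond, hsnd, ?_⟩
        intro c hcmem hccond
        rcases List.mem_append.mp hcmem with h | h
        · exact hmin c h hccond
        · simp at h; subst h
          by_cases he : |st.1 - raw| = |c - raw|
          · exact Or.inr ⟨he, le_of_lt (hlt st.1 hmem)⟩
          · left; omega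
  · simp only [hc, if_false]
    rcases hst with ⟨hst, hall⟩ | ⟨hmem, hcond, hsnd, hmin⟩
    · left
      refine ⟨hst, ?_⟩
      intro c hcmem
      rcases List.mem_append.mp hcmem with h | h
      · exact hall c h
      · simp at h; subst h; simpa [pvCond] using hc
    · right
      refine ⟨List.mem_append.mpr (Or.inl hmem), hcond, hsnd, ?_⟩
      intro c hcmem hccond
      rcases List.mem_append.mp hcmem with h | h
      · exact hmin c h hccond
      · simp at h; subst h; exact absurd (by simpa [pvCond] using hccond) hc

lemma pvFoldA_inv (raw : Int) (allowed : List Int) (L : List Int) (hp : L.Pairwise (· < ·)) :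
    pvInv raw allowed L (L.foldl (pvStepA raw allowed) (raw, none)) := by
  induction L using List.reverseRecOn with
  | nil => left; exact ⟨rfl, by simp⟩
  | append_singleton L a ih =>
    rw [List.foldl_append]
    have hsplit := List.pairwise_append.mp hp
    exact pvInv_step raw allowed L _ a (ih hsplit.1)
      (fun x hx => hsplit.2.2 x hx a (by simp))

lemma pvA_isBest (raw : Int) (allowed : List Int) :
    pvIsBest raw allowed (nearest_scale_midi_py raw allowed) := by
  unfold nearest_scale_midi_py
  have hinv := pvFoldA_inv raw allowed (PySem.List.pyRange (raw - 12) (raw + 13))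
    (PySem.List.pairwise_lt_pyRange_one _ _)
  rcases hinv with ⟨hst, hall⟩ | ⟨hmem, hcond, _, hmin⟩
  · rw [hst]
    left
    refine ⟨rfl, fun c h1 h2 => hall c (PySem.List.mem_pyRange_one.mpr ⟨by omega, by omega⟩)⟩
  · right
    have hb := PySem.List.mem_pyRange_one.mp hmem
    exact ⟨by omega, by omega, hcond, fun c h1 h2 hc =>
      hmin c (PySem.List.mem_pyRange_one.mpr ⟨by omega, by omega⟩) hc⟩

-- B's membership test is pvCond
lemma pvContains_eq_cond (allowed : List Int) (c : Int) :
    PySem.Set.contains (PySem.Set.ofList allowed) (PySem.Int.mod c 12) = pvCond allowed c := by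
  simp [PySem.Set.contains, pvCond, PySem.Set.mem_ofList]

-- B's ring search, started at distance 13 - n, returns the best candidate provided
-- every smaller distance has already been ruled out
lemma pvLoopB_char (raw : Int) (allowed : List Int) :
    ∀ n : Nat, n ≤ 13 →
    (∀ e : Int, 0 ≤ e → e < 13 - (n : Int) →
      pvCond allowed (raw - e) = false ∧ pvCond allowed (raw + e) = false) →
    pvIsBest raw allowed
      (pvLoopB raw (PySem.Set.ofList allowed) (PySem.List.pyRange (13 - (n : Int)) 13)) := by
  intro n
  induction n with
  | zero =>
    intro _ h
    have : PySem.List.pyRange (13 - ((0 : Nat) : Int)) 13 = [] := by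
      rw [PySem.List.pyRange_one]; simp
    rw [this]
    left
    refine ⟨rfl, fun c h1 h2 => ?_⟩
    by_cases hcle : c ≤ raw
    · have := (h (raw - c) (by omega) (by omega)).1
      simpa [show raw - (raw - c) = c by omega] using this
    · have := (h (c - raw) (by omega) (by omega)).2
      simpa [show raw + (c - raw) = c by omega] using this
  | succ n ih =>
    intro hn h
    set d : Int := 13 - ((n + 1 : Nat) : Int) with hd
    have hd0 : 0 ≤ d := by omega
    have hd12 : d ≤ 12 := by omega
    have hcons : PySem.List.pyRange d 13 = d :: PySem.List.pyRange (d + 1) 13 :=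
      PySem.List.pyRange_one_cons (by omega)
    rw [hcons]
    unfold pvLoopB
    rw [pvContains_eq_cond, pvContains_eq_cond]
    by_cases h1 : pvCond allowed (raw - d) = true
    · rw [if_pos h1]
      right
      refine ⟨by omega, by omega, h1, ?_⟩
      intro c hc1 hc2 hcc
      have habs : |raw - d - raw| = d := by rw [Int.abs_eq_natAbs]; omega
      by_cases hlt : |c - raw| < d
      · exfalso
        rw [Int.abs_eq_natAbs] at hlt
        by_cases hcle : c ≤ raw
        · have := (h (raw - c) (by omega) (by omega)).1
          rw [show raw - (raw - c) = c by omega] at this; simp [this] at hcc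
        · have := (h (c - raw) (by omega) (by omega)).2
          rw [show raw + (c - raw) = c by omega] at this; simp [this] at hcc
      · by_cases heq : |c - raw| = d
        · right
          constructor
          · omega
          · rw [Int.abs_eq_natAbs] at heq; omega
        · left
          rw [habs]
          rw [Int.abs_eq_natAbs] at hlt heq ⊢; omega
    · rw [if_neg h1]
      by_cases h2 : pvCond allowed (raw + d) = true
      · rw [if_pos h2]
        right
        refine ⟨by omega, by omega, h2, ?_⟩
        intro c hc1 hc2 hcc
        have habs : |raw + d - raw| = d := by rw [Int.abs_eq_natAbs]; omega
        by_cases hlt : |c - raw| < d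
        · exfalso
          rw [Int.abs_eq_natAbs] at hlt
          by_cases hcle : c ≤ raw
          · have := (h (raw - c) (by omega) (by omega)).1
            rw [show raw - (raw - c) = c by omega] at this; simp [this] at hcc
          · have := (h (c - raw) (by omega) (by omega)).2
            rw [show raw + (c - raw) = c by omega] at this; simp [this] at hcc
        · by_cases heq : |c - raw| = d
          · -- c = raw - d (ruled out by h1) or c = raw + d
            rw [Int.abs_eq_natAbs] at heq
            have : c = raw - d ∨ c = raw + d := by omega
            rcases this with rfl | rfl
            · simp [hcc] at h1
            · right; rw [habs]; exact ⟨rfl, le_refl _⟩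
          · left
            rw [habs]
            rw [Int.abs_eq_natAbs] at hlt heq ⊢; omega
      · rw [if_neg h2]
        have hstep : d + 1 = 13 - (n : Int) := by omega
        rw [hstep]
        apply ih (by omega)
        intro e he1 he2
        by_cases hlt : e < d
        · exact h e he1 (by omega)
        · have : e = d := by omega
          subst this
          exact ⟨by simpa using h1, by simpa using h2⟩

lemma pvB_isBest (raw : Int) (allowed : List Int) :
    pvIsBest raw allowed (nearest_scale_midi_py_alt raw allowed) := by
  unfold nearest_scale_midi_py_alt
  have := pvLoopB_char raw allowed 13 (le_refl _) (by intro e he1 he2; omega)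
  simpa using this

-- ===== VERDICT (by name: the statement is the Claim_ definition above) =====
theorem nearest_scale_midi_py_spec : Claim_equal_nearest_scale_midi_py := by
  intro raw_midi allowed_pitch_classes _
  exact pvIsBest_unique raw_midi allowed_pitch_classes _ _
    (pvA_isBest raw_midi allowed_pitch_classes) (pvB_isBest raw_midi allowed_pitch_classes)
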